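-- pv_equiv track=rewrite | github.com/whoschek/bzfs | bzfs_main/util/utils.py | dataset_paths
-- ===== SOURCE A (Python) =====
-- from collections.abc import (
--     ItemsView,
--     Iterable,
--     Iterator,
--     Sequence,
-- )
--
-- def dataset_paths(dataset: str) -> Iterator[str]:
--     """Enumerates all paths of a valid ZFS dataset name; Example: "a/b/c" --> yields "a", "a/b", "a/b/c"."""
--     i: int = 0
--     while i >= 0:
--         i = dataset.find("/", i)
--         if i < 0:
--             yield dataset
--         else:
--             yield dataset[:i]
--             i += 1
-- ===== SOURCE B (Python) =====
-- def dataset_paths(dataset: str):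
--     """Enumerates all paths of a valid ZFS dataset name; Example: "a/b/c" --> yields "a", "a/b", "a/b/c"."""
--     parts = dataset.split("/")
--     prefix = parts[0]
--     yield prefix
--     for part in parts[1:]:
--         prefix = prefix + "/" + part
--         yield prefix
-- ===== Notes on version B (the rewrite author's own statement) =====
-- stated objective: idiomatic
-- what changed: B tokenizes the dataset name once with str.split on the slash separator and rebuilds each ancestor by extending a running prefix, instead of A's index-driven while loop that repeatedly calls str.find and slices the string.
import Mathlib
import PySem

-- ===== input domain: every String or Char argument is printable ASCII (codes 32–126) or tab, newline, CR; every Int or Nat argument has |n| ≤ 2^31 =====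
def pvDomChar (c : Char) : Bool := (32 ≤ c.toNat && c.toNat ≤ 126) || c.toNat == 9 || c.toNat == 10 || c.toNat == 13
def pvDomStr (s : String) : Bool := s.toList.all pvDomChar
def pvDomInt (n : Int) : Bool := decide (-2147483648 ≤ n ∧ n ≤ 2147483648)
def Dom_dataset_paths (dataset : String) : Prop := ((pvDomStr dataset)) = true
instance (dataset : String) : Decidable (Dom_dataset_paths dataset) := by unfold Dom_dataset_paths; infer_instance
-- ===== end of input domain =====

-- B tokenizes once with str.split on the slash separator and extends a running prefix, instead of A's find/slice index loop; objective: more idiomatic decomposition (same cost).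

-- ===== PORT A =====
-- A's while-loop as recursion on a fuel counter; the fuel only makes the loop
-- total (length + 1 iterations always suffice, as the proof below shows).
def dataset_paths_loop (dataset : String) : Nat → Int → List String
  | 0, _ => []
  | fuel+1, i =>
    if i < 0 then []
    else
      let j : Int := PySem.Str.findFrom dataset "/" i none
      if j < 0 then [dataset]
      else PySem.Str.slice dataset none (some j) :: dataset_paths_loop dataset fuel (j+1)

def dataset_paths (dataset : String) : List String :=
  dataset_paths_loop dataset (dataset.toList.length + 1) 0

-- ===== PORT B =====
-- the loop of Source B: for each remaining part, extend the running prefix and yield it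
def dataset_paths_alt_loop (pre : List Char) : List (List Char) → List (List Char)
  | [] => []
  | q :: qs => (pre ++ '/' :: q) :: dataset_paths_alt_loop (pre ++ '/' :: q) qs

-- split the name, yield the first part, then run the loop (split never returns an empty list)
def dataset_paths_alt (dataset : String) : List String :=
  match PySem.Chars.splitOn dataset.toList ['/'] with
  | [] => []
  | p :: rest => (p :: dataset_paths_alt_loop p rest).map String.ofList

-- ===== PRECONDITION & SPEC =====
def Spec_dataset_paths (dataset : String) (out : List String) : Prop := out = dataset_paths_alt dataset
instance (dataset : String) (out : List String) : Decidable (Spec_dataset_paths dataset out) := by unfold Spec_dataset_paths; infer_instance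

-- ===== CLAIM (what is proved, stated in full; the proofs are below) =====
def Claim_equal_dataset_paths : Prop := ∀ (dataset : String), Dom_dataset_paths dataset → Spec_dataset_paths dataset (dataset_paths dataset)

-- ===== LEMMAS AND PROOFS =====

-- reference splitter: split on '/' keeping empty segments (what str.split('/') computes)
def pvSplit : List Char → List (List Char)
  | [] => [[]]
  | c :: rest =>
    if c = '/' then [] :: pvSplit rest
    else
      match pvSplit rest with
      | [] => [[c]]
      | p :: ps => (c :: p) :: ps

-- reference prefix enumeration, char by char
def pvPref : List Char → List (List Char)
  | [] => [[]]
  | c :: rest =>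
    if c = '/' then [] :: (pvPref rest).map (fun t => '/' :: t)
    else (pvPref rest).map (fun t => c :: t)

theorem pvSplit_ne_nil (l : List Char) : pvSplit l ≠ [] := by
  cases l with
  | nil => simp [pvSplit]
  | cons c rest =>
    simp only [pvSplit]
    split_ifs
    · simp
    · cases h : pvSplit rest <;> simp

theorem pv_go_spec : ∀ (fuel : Nat) (l cur : List Char) (acc : List (List Char)),
    l.length < fuel →
    PySem.Chars.splitOn.go ['/'] fuel l cur acc =
      acc.reverse ++ (match pvSplit l with
        | [] => []
        | p :: ps => (cur.reverse ++ p) :: ps) := by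
  intro fuel
  induction fuel with
  | zero => intro l cur acc h; omega
  | succ fuel ih =>
    intro l cur acc h
    cases l with
    | nil =>
      simp [PySem.Chars.splitOn.go, pvSplit]
    | cons c rest =>
      by_cases hc : c = '/'
      · subst hc
        have hpre : List.isPrefixOf ['/'] ('/' :: rest) = true := by
          simp [List.isPrefixOf]
        rw [PySem.Chars.splitOn.go]
        simp only [hpre, if_true, List.length_singleton, List.drop_one, List.tail_cons]
        rw [ih rest [] (cur.reverse :: acc) (by simpa using Nat.lt_of_succ_lt_succ h)]
        obtain ⟨p, ps, hps⟩ : ∃ p ps, pvSplit rest = p :: ps := by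
          cases hx : pvSplit rest with
          | nil => exact absurd hx (pvSplit_ne_nil rest)
          | cons p ps => exact ⟨p, ps, rfl⟩
        simp [pvSplit, hps]
      · have hpre : List.isPrefixOf ['/'] (c :: rest) = false := by
          simp [List.isPrefixOf]
          intro h'; exact hc h'.symm
        rw [PySem.Chars.splitOn.go]
        simp only [hpre, Bool.false_eq_true, if_false]
        rw [ih rest (c :: cur) acc (by simpa using Nat.lt_of_succ_lt_succ h)]
        obtain ⟨p, ps, hps⟩ : ∃ p ps, pvSplit rest = p :: ps := by
          cases hx : pvSplit rest with
          | nil => exact absurd hx (pvSplit_ne_nil rest)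
          | cons p ps => exact ⟨p, ps, rfl⟩
        simp [pvSplit, hps, hc]

theorem pv_splitOn_eq (l : List Char) : PySem.Chars.splitOn l ['/'] = pvSplit l := by
  unfold PySem.Chars.splitOn
  rw [pv_go_spec (l.length + 1) l [] [] (Nat.lt_succ_self _)]
  obtain ⟨p, ps, hps⟩ : ∃ p ps, pvSplit l = p :: ps := by
    cases hx : pvSplit l with
    | nil => exact absurd hx (pvSplit_ne_nil l)
    | cons p ps => exact ⟨p, ps, rfl⟩
  simp [hps]

theorem pv_loop_map : ∀ (qs : List (List Char)) (a pre : List Char),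
    dataset_paths_alt_loop (a ++ pre) qs = (dataset_paths_alt_loop pre qs).map (fun t => a ++ t) := by
  intro qs
  induction qs with
  | nil => intro a pre; simp [dataset_paths_alt_loop]
  | cons q qs ih =>
    intro a pre
    simp only [dataset_paths_alt_loop, List.map_cons, List.append_assoc]
    rw [ih a (pre ++ '/' :: q)]

theorem pv_pref_eq_split (l : List Char) :
    pvPref l = (match pvSplit l with
      | [] => []
      | p :: ps => p :: dataset_paths_alt_loop p ps) := by
  induction l with
  | nil => simp [pvPref, pvSplit, dataset_paths_alt_loop]
  | cons c rest ih =>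
    obtain ⟨p, ps, hps⟩ : ∃ p ps, pvSplit rest = p :: ps := by
      cases hx : pvSplit rest with
      | nil => exact absurd hx (pvSplit_ne_nil rest)
      | cons p ps => exact ⟨p, ps, rfl⟩
    rw [hps] at ih
    by_cases hc : c = '/'
    · subst hc
      simp only [pvPref, pvSplit, if_true, hps, ih]
      have : dataset_paths_alt_loop ('/' :: p) ps
          = (dataset_paths_alt_loop p ps).map (fun t => '/' :: t) := by
        simpa using pv_loop_map ps ['/'] p
      simp [dataset_paths_alt_loop, this]
    · simp only [pvPref, pvSplit, hc, if_false, hps, ih]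
      have : dataset_paths_alt_loop (c :: p) ps
          = (dataset_paths_alt_loop p ps).map (fun t => c :: t) := by
        simpa using pv_loop_map ps [c] p
      simp [this]

theorem pv_pref_no_slash : ∀ (l : List Char), '/' ∉ l → pvPref l = [l] := by
  intro l
  induction l with
  | nil => intro _; simp [pvPref]
  | cons c rest ih =>
    intro h
    have hc : c ≠ '/' := fun hc => h (by simp [hc])
    have hrest : '/' ∉ rest := fun hm => h (List.mem_cons_of_mem _ hm)
    simp [pvPref, hc, ih hrest]

theorem pv_pref_seg : ∀ (seg rest : List Char), '/' ∉ seg →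
    pvPref (seg ++ '/' :: rest) = seg :: (pvPref rest).map (fun t => seg ++ '/' :: t) := by
  intro seg
  induction seg with
  | nil => intro rest _; simp [pvPref]
  | cons a seg ih =>
    intro rest h
    have ha : a ≠ '/' := fun hc => h (by simp [hc])
    have hseg : '/' ∉ seg := fun hm => h (List.mem_cons_of_mem _ hm)
    simp only [List.cons_append, pvPref, ha, if_false, ih rest hseg]
    simp [List.map_map, Function.comp_def]

theorem pv_loop_spec (d : String) : ∀ (fuel i : Nat),
    i ≤ d.toList.length → d.toList.length - i < fuel →
    dataset_paths_loop d fuel (i : Int)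
      = (pvPref (d.toList.drop i)).map (fun t => String.ofList (d.toList.take i ++ t)) := by
  intro fuel
  induction fuel with
  | zero => intro i _ h; omega
  | succ fuel ih =>
    intro i hi hfuel
    have hnonneg : ¬ ((i : Int) < 0) := by exact_mod_cast Int.not_lt.mpr (Int.natCast_nonneg i)
    rw [dataset_paths_loop]
    simp only [hnonneg, if_false]
    have hfind : PySem.Str.findFrom d "/" (i : Int) none
        = if PySem.Chars.find (d.toList.drop i) ['/'] = -1 then -1
          else (i : Int) + PySem.Chars.find (d.toList.drop i) ['/'] := by
      show PySem.Chars.findFrom d.toList "/".toList (i : Int) none = _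
      have : "/".toList = ['/'] := rfl
      rw [this, PySem.Chars.findFrom_natCast d.toList ['/'] i hi]
    by_cases hneg : PySem.Chars.find (d.toList.drop i) ['/'] = -1
    · rw [hfind]
      simp only [hneg, if_true, show ((-1 : Int) < 0) = True by simp, if_true]
      have hmem : '/' ∉ d.toList.drop i := by
        have := (PySem.Chars.find_eq_neg_one_iff (d.toList.drop i) ['/']).mp hneg
        intro hm
        exact this ((List.singleton_infix_iff '/' (d.toList.drop i)).mpr hm)
      rw [pv_pref_no_slash _ hmem]
      simp only [List.map_cons, List.map_nil, List.take_append_drop]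
      have hofto : String.ofList d.toList = d := String.toList_inj.mp (by simp)
      rw [hofto]
    · set k : Int := PySem.Chars.find (d.toList.drop i) ['/'] with hk
      have hk0 : 0 ≤ k := by
        have := PySem.Chars.neg_one_le_find (d.toList.drop i) ['/']
        rw [← hk] at this
        omega
      obtain ⟨hpre, hmin⟩ := PySem.Chars.find_spec (s := d.toList.drop i) (sub := ['/']) hk0
      set k' : Nat := k.toNat with hk'
      have hkk : (k' : Int) = k := Int.toNat_of_nonneg hk0
      obtain ⟨t, ht⟩ := hpre
      have ht' : (d.toList.drop i).drop k' = '/' :: t := by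
        rw [← ht]; rfl
      have hlen : i + k' < d.toList.length := by
        have h1 : ('/' :: t).length = (d.toList.drop i).length - k' := by
          rw [← ht', List.length_drop]
        have h2 : (d.toList.drop i).length = d.toList.length - i := List.length_drop
        rw [List.length_cons] at h1
        omega
      set seg : List Char := (d.toList.drop i).take k' with hseg
      have hsegmem : '/' ∉ seg := by
        intro hm
        obtain ⟨m, hmlt, hme⟩ := List.getElem_of_mem hm
        have hmk : m < k' := by
          rw [hseg, List.length_take] at hmlt
          omega
        have hmd : m < (d.toList.drop i).length := by
          rw [List.length_drop]
          omega
        have : (d.toList.drop i)[m] = '/' := by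
          rw [← hme]
          simp [hseg, List.getElem_take]
        exact hmin m hmk ⟨(d.toList.drop i).drop (m+1), by
          rw [List.drop_eq_getElem_cons hmd, this]
          rfl⟩
      have hdecomp : d.toList.drop i = seg ++ '/' :: t := by
        rw [hseg, ← ht', List.take_append_drop]
      rw [hfind]
      simp only [hneg, if_false]
      have hjpos : ¬ ((i : Int) + k < 0) := by omega
      simp only [hjpos, if_false]
      have hdrop2 : d.toList.drop (i + k' + 1) = t := by
        have h1 : d.toList.drop (i + k') = '/' :: t := by
          rw [← ht', List.drop_drop]
        have : d.toList.drop (i + k' + 1) = (d.toList.drop (i + k')).drop 1 := by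
          rw [List.drop_drop]
        rw [this, h1]; simp
      have htake2 : d.toList.take (i + k' + 1) = (d.toList.take i ++ seg) ++ ['/'] := by
        have h1 : d.toList.take (i + k') = d.toList.take i ++ seg := by
          rw [List.take_add]
        have h2 : d.toList.drop (i + k') = '/' :: t := by
          rw [← ht', List.drop_drop]
        rw [show i + k' + 1 = (i + k') + 1 from rfl, List.take_add, h1, h2]
        simp
      have hihyp := ih (i + k' + 1) (by omega) (by omega)
      have hcast : (i : Int) + k + 1 = ((i + k' + 1 : Nat) : Int) := by
        push_cast
        omega
      rw [hcast, hihyp, hdrop2, htake2]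
      -- head string
      have hhead : PySem.Str.slice d none (some ((i : Int) + k))
          = String.ofList (d.toList.take i ++ seg) := by
        have : PySem.Str.slice d none (some ((i : Int) + k))
            = String.ofList (PySem.List.slice d.toList none (some ((i : Int) + k))) := by
          simp [PySem.Str.slice]
        rw [this, PySem.List.slice_to d.toList (show (0:Int) ≤ (i:Int) + k by omega)]
        have : ((i : Int) + k).toNat = i + k' := by omega
        rw [this, List.take_add]
      rw [hdecomp, pv_pref_seg seg t hsegmem]
      simp [hhead, List.map_map, Function.comp_def, List.append_assoc]

theorem pv_A_eq (d : String) :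
    dataset_paths d = (pvPref d.toList).map String.ofList := by
  unfold dataset_paths
  have h := pv_loop_spec d (d.toList.length + 1) 0 (Nat.zero_le _) (by omega)
  simpa using h

theorem pv_B_eq (d : String) :
    dataset_paths_alt d = (pvPref d.toList).map String.ofList := by
  unfold dataset_paths_alt
  rw [pv_splitOn_eq, pv_pref_eq_split]
  obtain ⟨p, ps, hps⟩ : ∃ p ps, pvSplit d.toList = p :: ps := by
    cases hx : pvSplit d.toList with
    | nil => exact absurd hx (pvSplit_ne_nil d.toList)
    | cons p ps => exact ⟨p, ps, rfl⟩
  rw [hps]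

-- ===== VERDICT (by name: the statement is the Claim_ definition above) =====
theorem dataset_paths_spec : Claim_equal_dataset_paths := by
  intro dataset _
  unfold Spec_dataset_paths
  rw [pv_A_eq, pv_B_eq]
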